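-- pv_equiv track=rewrite | github.com/oonaghmw/year1Python | blanagram.py | blanagram
-- ===== SOURCE A (Python) =====
-- def blanagram(word, anagramdict):
-- 	"""
-- 	Returns a list of the blanagrams, (an anagram if one letter in word is switched
-- 	for another letter), of a given word.
-- 	Args:
-- 		word 		-- the word to find 'blanagrams' of
-- 		anagramdict -- a dictionary which has each value as a list of words that are
-- 					   anagrams of eachother, and the associated key as the sorted
-- 					   letters that make up the anagrams in the value.
-- 	Returns:
-- 		A list of 'blanagrams' of 'word' sourced from anagramdict.
-- 	Caveats:
-- 		It is possible that 'word' may not be in the comprehensive anagramdict, in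
-- 		which case an error will be thrown.
-- 	"""
-- 	#guard statements
-- 	if not type(word) == str or not type(anagramdict) == dict:
-- 		raise TypeError ('Please input arguments types as (string, dictionary)')
--
-- 	checked = []
-- 	blanagrams = []
-- 	word = list(word.lower())
--
-- 	if '-' in word:
-- 		word.remove('-')
--
-- 	alphabet = ['a', 'b', 'c', 'd', 'e', 'f', 'g', 'h', 'i', 'j',
-- 				'k', 'l', 'm', 'n', 'o', 'p', 'q', 'r', 's', 't',
-- 				'u', 'v', 'w', 'x', 'y', 'z']
--
-- 	for i in range(len(word)):
-- 		if word[i] in checked: #avoid switching same letter twice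
-- 			continue
--
-- 		originali = word[i]
-- 		checked.append(originali)
--
-- 		for j in alphabet:
-- 			if not originali == j: # don't switch letter for same letter
-- 				word[i] = j
--
-- 				sort_word = ''.join(sorted(word))
--
-- 				try:
-- 					for item in anagramdict[sort_word]:
-- 						blanagrams.append(item)
--
-- 				except:
-- 					pass
--
-- 		word[i] = originali #restore word to original for next iteration
--
-- 	blanagrams = sorted(blanagrams)
-- 	return blanagrams
-- ===== SOURCE B (Python) =====
-- def _insort(s, ch):
--     """Return the sorted string s with ch inserted, found by binary search, built by slicing."""
--     lo = 0
--     hi = len(s)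
--     while lo < hi:
--         mid = (lo + hi) // 2
--         if s[mid] < ch:
--             lo = mid + 1
--         else:
--             hi = mid
--     return s[:lo] + ch + s[lo:]
--
--
-- def blanagram(word, anagramdict):
--     if not type(word) == str or not type(anagramdict) == dict:
--         raise TypeError('Please input arguments types as (string, dictionary)')
--
--     letters = list(word.lower())
--     if '-' in letters:
--         letters.remove('-')
--
--     base = sorted(letters)          # sort ONCE; every key is derived incrementally from it
--
--     distinct = []                   # distinct letters in first-occurrence order
--     for ch in letters:
--         if ch not in distinct:
--             distinct.append(ch)
--
--     out = []
--     for c in distinct: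
--         rest = list(base)
--         rest.remove(c)              # sorted multiset of letters minus one c
--         rs = ''.join(rest)
--         for j in 'abcdefghijklmnopqrstuvwxyz':
--             if j != c:
--                 key = _insort(rs, j)
--                 if key in anagramdict:
--                     out.extend(anagramdict[key])
--     return sorted(out)
-- ===== Notes on version B (the rewrite author's own statement) =====
-- stated objective: faster
-- what changed: B sorts the word once and derives each substitution's dictionary key by binary-searching the insertion point of the new letter in the sorted word with one copy of the replaced letter removed (iterating over the distinct letters directly), instead of A's full re-sort of the mutated word for each of the ~26*k substitutions.
import Mathlib
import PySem

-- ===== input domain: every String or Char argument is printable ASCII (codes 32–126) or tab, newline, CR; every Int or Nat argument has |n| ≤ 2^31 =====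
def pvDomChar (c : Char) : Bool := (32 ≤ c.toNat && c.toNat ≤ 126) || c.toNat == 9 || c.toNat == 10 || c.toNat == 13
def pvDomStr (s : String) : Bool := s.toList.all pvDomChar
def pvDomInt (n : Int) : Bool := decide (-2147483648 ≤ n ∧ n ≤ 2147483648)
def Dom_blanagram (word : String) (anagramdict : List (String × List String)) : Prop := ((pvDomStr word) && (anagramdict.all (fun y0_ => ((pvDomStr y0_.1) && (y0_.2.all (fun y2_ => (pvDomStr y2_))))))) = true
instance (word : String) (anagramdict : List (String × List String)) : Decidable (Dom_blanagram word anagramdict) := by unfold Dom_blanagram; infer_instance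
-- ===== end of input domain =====

-- B replaces A's full re-sort of the mutated word at every substitution by one initial sort plus an
-- erase-one-letter / binary-search-insert-one-letter update of the sorted key (objective: faster,
-- measured).

-- the alphabet constant both Pythons spell out
def pvAlphabet : List Char :=
  ['a', 'b', 'c', 'd', 'e', 'f', 'g', 'h', 'i', 'j',
   'k', 'l', 'm', 'n', 'o', 'p', 'q', 'r', 's', 't',
   'u', 'v', 'w', 'x', 'y', 'z']

-- ===== PORT A =====
-- A's inner 'for j in alphabet' body: word[i] = j; sort the whole word; try: append anagramdict[key]
def pvInnerA (d : PySem.Dict String (List String)) (i : Int) (c : Char)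
    (p : List Char × List String) (j : Char) : List Char × List String :=
  if ¬ (c == j) then
    let w' := PySem.List.pySetD p.1 i j
    let key := String.ofList (PySem.List.sorted w' (fun x => x) false)   -- ''.join(sorted(word))
    match d.get? key with                                               -- try … except: pass
    | some items => (w', items.foldl (fun bl it => bl ++ [it]) p.2)     -- for item in …: blanagrams.append(item)
    | none => (w', p.2)
  else p

-- A's outer 'for i in range(len(word))' body over state (word, checked, blanagrams)
def pvOuterA (d : PySem.Dict String (List String))
    (st : List Char × List Char × List String) (i : Int) : List Char × List Char × List String :=
  let c := PySem.List.pyGetD st.1 i ' '                -- word[i] (always in range here)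
  if st.2.1.contains c then st                         -- if word[i] in checked: continue
  else
    let checked := st.2.1 ++ [c]                       -- checked.append(originali)
    let p := pvAlphabet.foldl (pvInnerA d i c) (st.1, st.2.2)
    (PySem.List.pySetD p.1 i c, checked, p.2)          -- word[i] = originali

def blanagram (word : String) (anagramdict : List (String × List String)) : List String :=
  let d := PySem.Dict.mk anagramdict
  let w0 := PySem.Chars.lower word.toList              -- word = list(word.lower())
  let w1 :=                                            -- if '-' in word: word.remove('-')  (remove? cannot fail: '-' is a member)
    if w0.contains '-' then
      match PySem.List.remove? w0 '-' with
      | some r => r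
      | none => w0
    else w0
  let st := (PySem.List.pyRange 0 (w1.length : Int) 1).foldl (pvOuterA d) (w1, ([] : List Char), ([] : List String))
  PySem.List.sorted st.2.2 (fun s => s) false          -- sorted(blanagrams)

-- ===== PORT B =====
-- _insort's binary-search loop: while lo < hi: mid=(lo+hi)//2; if s[mid] < ch: lo=mid+1 else hi=mid
-- ((lo+hi)//2 on the nonnegative values involved is exactly Nat division)
def pvInsortGo (s : List Char) (ch : Char) (lo hi : Nat) : Nat :=
  if _h : lo < hi then
    -- mid = (lo + hi) // 2, inlined
    if PySem.List.pyGetD s (((lo + hi) / 2 : Nat) : Int) ' ' < ch then pvInsortGo s ch ((lo + hi) / 2 + 1) hi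
    else pvInsortGo s ch lo ((lo + hi) / 2)
  else lo
termination_by hi - lo
decreasing_by all_goals omega

-- _insort(s, ch) = s[:lo] + ch + s[lo:]
def pvInsort (s : List Char) (ch : Char) : List Char :=
  PySem.List.slice s none (some ((pvInsortGo s ch 0 s.length : Nat) : Int)) ++
    ch :: PySem.List.slice s (some ((pvInsortGo s ch 0 s.length : Nat) : Int)) none

-- B's inner 'for j in alphabet' body: incremental key, extend on membership
def pvInnerB (d : PySem.Dict String (List String)) (rest : List Char) (c : Char)
    (out : List String) (j : Char) : List String :=
  if j ≠ c then
    let key := String.ofList (pvInsort rest j)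
    if d.contains key then out ++ d.getD key [] else out   -- if key in anagramdict: out.extend(…)
  else out

-- B's outer 'for c in distinct' body: rest = sorted word minus one c (rs = ''.join(rest) is rest itself here)
def pvOuterB (d : PySem.Dict String (List String)) (base : List Char)
    (out : List String) (c : Char) : List String :=
  let rest :=                                          -- rest.remove(c) (cannot fail: c ∈ base)
    match PySem.List.remove? base c with
    | some r => r
    | none => base
  pvAlphabet.foldl (pvInnerB d rest c) out

def blanagram_alt (word : String) (anagramdict : List (String × List String)) : List String :=
  let d := PySem.Dict.mk anagramdict
  let letters0 := PySem.Chars.lower word.toList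
  let letters :=
    if letters0.contains '-' then
      match PySem.List.remove? letters0 '-' with
      | some r => r
      | none => letters0
    else letters0
  let base := PySem.List.sorted letters (fun x => x) false           -- sort ONCE
  let distinct := letters.foldl (fun acc ch => if acc.contains ch then acc else acc ++ [ch]) []
  let out := distinct.foldl (pvOuterB d base) []
  PySem.List.sorted out (fun s => s) false

-- ===== PRECONDITION & SPEC =====
def Spec_blanagram (word : String) (anagramdict : List (String × List String)) (out : List String) : Prop := out = blanagram_alt word anagramdict
instance (word : String) (anagramdict : List (String × List String)) (out : List String) : Decidable (Spec_blanagram word anagramdict out) := by unfold Spec_blanagram; infer_instance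

-- ===== CLAIM (what is proved, stated in full; the proofs are below) =====
def Claim_equal_blanagram : Prop := ∀ (word : String) (anagramdict : List (String × List String)), Dom_blanagram word anagramdict → Spec_blanagram word anagramdict (blanagram word anagramdict)

-- ===== LEMMAS AND PROOFS =====

-- proof-side characterization of sorted insertion: the simple linear-scan insert
def pvInsChar : List Char → Char → List Char
  | [], ch => [ch]
  | x :: xs, ch => if x < ch then x :: pvInsChar xs ch else ch :: x :: xs

-- the binary-search insert of port B equals the linear-scan insert on a sorted list
theorem pvInsortGo_spec (s : List Char) (ch : Char) (hs : s.Pairwise (· ≤ ·)) :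
    ∀ (n lo hi : Nat), hi - lo ≤ n → hi ≤ s.length → lo ≤ hi →
    (∀ k (hk : k < s.length), k < lo → s[k] < ch) →
    (∀ k (hk : k < s.length), hi ≤ k → ¬ s[k] < ch) →
    lo ≤ pvInsortGo s ch lo hi ∧ pvInsortGo s ch lo hi ≤ hi ∧
    (∀ k (hk : k < s.length), k < pvInsortGo s ch lo hi → s[k] < ch) ∧
    (∀ k (hk : k < s.length), pvInsortGo s ch lo hi ≤ k → ¬ s[k] < ch) := by
  have hmono : ∀ (p q : Nat) (hq : q < s.length) (hpq : p ≤ q), s[p]'(by omega) ≤ s[q] := by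
    intro p q hq hpq
    rcases Nat.eq_or_lt_of_le hpq with h | h
    · subst h; exact le_rfl
    · exact List.pairwise_iff_getElem.mp hs p q (by omega) hq h
  intro n
  induction n with
  | zero =>
    intro lo hi hn hhi hlh hlow hhigh
    have heq : ¬ lo < hi := by omega
    rw [pvInsortGo, dif_neg heq]
    exact ⟨le_rfl, by omega, fun k hk h => hlow k hk h, fun k hk h => hhigh k hk (by omega)⟩
  | succ n ih =>
    intro lo hi hn hhi hlh hlow hhigh
    by_cases hcase : lo < hi
    · rw [pvInsortGo, dif_pos hcase]
      have hmidlt : (lo + hi) / 2 < s.length := by omega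
      rw [PySem.List.pyGetD_natCast, List.getD_eq_getElem _ _ hmidlt]
      by_cases hc : s[(lo + hi) / 2] < ch
      · rw [if_pos hc]
        refine (ih ((lo + hi) / 2 + 1) hi (by omega) hhi (by omega) ?_ hhigh).imp ?_ id
        · intro k hk h
          exact lt_of_le_of_lt (hmono k ((lo + hi) / 2) hmidlt (by omega)) hc
        · intro h; omega
      · rw [if_neg hc]
        refine (ih lo ((lo + hi) / 2) (by omega) (by omega) (by omega) hlow ?_).imp id
          (fun h => ⟨by omega, h.2⟩)
        intro k hk h hlt
        exact hc (lt_of_le_of_lt (hmono ((lo + hi) / 2) k hk h) hlt)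
    · rw [pvInsortGo, dif_neg hcase]
      exact ⟨le_rfl, by omega, fun k hk h => hlow k hk h, fun k hk h => hhigh k hk (by omega)⟩

theorem pvInsChar_eq_take_drop (s : List Char) (ch : Char) :
    ∀ (q : Nat), q ≤ s.length →
    (∀ k (hk : k < s.length), k < q → s[k] < ch) →
    (∀ k (hk : k < s.length), q ≤ k → ¬ s[k] < ch) →
    pvInsChar s ch = s.take q ++ ch :: s.drop q := by
  induction s with
  | nil =>
    intro q hq _ _
    have : q = 0 := by simpa using hq
    simp [pvInsChar, this]
  | cons x xs ihs =>
    intro q hq h1 h2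
    by_cases hx : x < ch
    · have hq0 : q ≠ 0 := by
        intro h0
        exact h2 0 (by simp) (by omega) hx
      obtain ⟨q', rfl⟩ : ∃ q', q = q' + 1 := ⟨q - 1, by omega⟩
      simp only [pvInsChar, if_pos hx, List.take_succ_cons, List.drop_succ_cons, List.cons_append,
        List.cons.injEq, true_and]
      refine ihs q' (by simp at hq; omega) ?_ ?_
      · intro k hk hkq
        have := h1 (k + 1) (by simpa using hk) (by omega)
        simpa using this
      · intro k hk hkq
        have := h2 (k + 1) (by simpa using hk) (by omega)
        simpa using this
    · have hq0 : q = 0 := by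
        by_contra h0
        exact hx (h1 0 (by simp) (by omega))
      simp [pvInsChar, hx, hq0]

theorem pvInsort_eq_pvInsChar (s : List Char) (ch : Char) (hs : s.Pairwise (· ≤ ·)) :
    pvInsort s ch = pvInsChar s ch := by
  obtain ⟨hlo, hhi, h1, h2⟩ := pvInsortGo_spec s ch hs s.length 0 s.length (by omega) le_rfl
    (by omega) (by intro k hk h; omega) (by intro k hk h; omega)
  unfold pvInsort
  rw [PySem.List.slice_to_natCast, PySem.List.slice_from_natCast,
    pvInsChar_eq_take_drop s ch (pvInsortGo s ch 0 s.length) hhi h1 h2]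

theorem pvInsChar_perm (l : List Char) (ch : Char) : (pvInsChar l ch).Perm (ch :: l) := by
  induction l with
  | nil => simp [pvInsChar]
  | cons x xs ih =>
    simp only [pvInsChar]
    split
    · exact ((ih.cons x).trans (List.Perm.swap ch x xs))
    · exact List.Perm.refl _

theorem pvInsChar_pairwise (l : List Char) (ch : Char)
    (h : l.Pairwise (· ≤ ·)) : (pvInsChar l ch).Pairwise (· ≤ ·) := by
  induction l with
  | nil => simp [pvInsChar]
  | cons x xs ih =>
    rcases List.pairwise_cons.mp h with ⟨hx, hxs⟩
    simp only [pvInsChar]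
    split
    · rename_i hlt
      refine List.pairwise_cons.mpr ⟨?_, ih hxs⟩
      intro y hy
      have hy' : y ∈ ch :: xs := (pvInsChar_perm xs ch).mem_iff.mp hy
      rcases List.mem_cons.mp hy' with h1 | h2
      · exact h1 ▸ le_of_lt hlt
      · exact hx _ h2
    · rename_i hnlt
      have hchx : ch ≤ x := le_of_not_gt hnlt
      refine List.pairwise_cons.mpr ⟨?_, h⟩
      intro y hy
      rcases List.mem_cons.mp hy with h1 | h2
      · exact h1 ▸ hchx
      · exact hchx.trans (hx _ h2)

-- the key fact: re-sorting the word with position i overwritten by j equals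
-- inserting j into the sorted word with one copy of w[i] erased
theorem pv_key_eq (w : List Char) (i : Nat) (j : Char) (hi : i < w.length) :
    PySem.List.sorted (w.set i j) (fun x => x) false
      = pvInsChar ((PySem.List.sorted w (fun x => x) false).erase w[i]) j := by
  have hmem : w[i] ∈ w := List.getElem_mem hi
  have hset : w.set i j = w.take i ++ j :: w.drop (i + 1) := by
    rw [List.set_eq_take_append_cons_drop]; simp [hi]
  have hperm1 : w.Perm (w[i] :: (w.take i ++ w.drop (i + 1))) := by
    conv_lhs => rw [← List.take_append_drop i w, ← List.getElem_cons_drop hi]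
    exact List.perm_middle
  have hperm2 : w.Perm (w[i] :: w.erase w[i]) := List.perm_cons_erase hmem
  have hmid : (w.take i ++ w.drop (i + 1)).Perm (w.erase w[i]) :=
    (hperm1.symm.trans hperm2).cons_inv
  have h1 : (w.set i j).Perm (j :: w.erase w[i]) := by
    rw [hset]
    exact List.perm_middle.trans (hmid.cons j)
  have h2 : (pvInsChar ((PySem.List.sorted w (fun x => x) false).erase w[i]) j).Perm
      (j :: w.erase w[i]) :=
    (pvInsChar_perm _ _).trans
      (((PySem.List.sorted_perm w (fun x => x) false).erase w[i]).cons j)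
  refine PySem.List.eq_of_perm_of_pairwise_le_of_injective (fun x => x) (fun a b h => h)
    (((PySem.List.sorted_perm _ _ _).trans h1).trans h2.symm) ?_ ?_
  · exact PySem.List.sorted_pairwise _ _
  · exact pvInsChar_pairwise _ _ (List.Pairwise.sublist List.erase_sublist (PySem.List.sorted_pairwise _ _))

-- the per-letter contribution, in B's (incremental-key) form
def pvChunk (d : PySem.Dict String (List String)) (w : List Char) (c : Char) : List String :=
  pvAlphabet.flatMap (fun j =>
    if c == j then []
    else (d.get? (String.ofList (pvInsChar ((PySem.List.sorted w (fun x => x) false).erase c) j))).getD [])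

-- the fresh letters of xs given already-seen letters
def pvD : List Char → List Char → List Char
  | [], _ => []
  | x :: xs, s => if s.contains x then pvD xs s else x :: pvD xs (s ++ [x])

theorem pvD_mem {xs s : List Char} {c : Char} (h : c ∈ pvD xs s) : c ∈ xs := by
  induction xs generalizing s with
  | nil => simp [pvD] at h
  | cons x xs ih =>
    simp only [pvD] at h
    split at h
    · exact List.mem_cons_of_mem _ (ih h)
    · rcases List.mem_cons.mp h with h1 | h2
      · exact h1 ▸ List.mem_cons_self
      · exact List.mem_cons_of_mem _ (ih h2)

theorem pvD_fold (xs s : List Char) :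
    xs.foldl (fun acc ch => if acc.contains ch then acc else acc ++ [ch]) s = s ++ pvD xs s := by
  induction xs generalizing s with
  | nil => simp [pvD]
  | cons x xs ih =>
    simp only [List.foldl_cons, pvD]
    by_cases hx : s.contains x
    · simp only [hx, if_true]
      rw [ih]
    · simp only [hx, if_false, Bool.false_eq_true]
      rw [ih]
      simp

theorem pv_flatten_singleton (l : List String) : (List.map (fun it => [it]) l).flatten = l := by
  induction l with
  | nil => rfl
  | cons y ys ihy => simp [ihy]

-- A's inner alphabet loop, with word = w.set i x on entry
theorem pv_inner (d : PySem.Dict String (List String)) (w : List Char) (i : Nat) (c : Char)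
    (al : List Char) : ∀ (x : Char) (bl : List String),
    al.foldl (pvInnerA d (i : Int) c) (w.set i x, bl)
    = (w.set i (al.foldl (fun a j => if ¬ (c == j) then j else a) x),
       bl ++ al.flatMap (fun j =>
         if c == j then []
         else (d.get? (String.ofList (PySem.List.sorted (w.set i j) (fun x => x) false))).getD [])) := by
  induction al with
  | nil => intro x bl; simp
  | cons a al ih =>
    intro x bl
    simp only [List.foldl_cons, List.flatMap_cons]
    by_cases hca : c == a
    · have h1 : pvInnerA d (i : Int) c (w.set i x, bl) a = (w.set i x, bl) := by
        simp [pvInnerA, hca]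
      rw [h1, ih x bl]
      simp [hca]
    · have hset : PySem.List.pySetD (w.set i x) (i : Int) a = w.set i a := by
        rw [PySem.List.pySetD_natCast, List.set_set]
      cases hget : d.get? (String.ofList (PySem.List.sorted (w.set i a) (fun x => x) false)) with
      | some items =>
        have h1 : pvInnerA d (i : Int) c (w.set i x, bl) a = (w.set i a, bl ++ items) := by
          simp [pvInnerA, hca, hset, hget, pv_flatten_singleton]
        rw [h1, ih a (bl ++ items)]
        simp [hca, List.append_assoc]
      | none =>
        have h1 : pvInnerA d (i : Int) c (w.set i x, bl) a = (w.set i a, bl) := by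
          simp [pvInnerA, hca, hset, hget]
        rw [h1, ih a bl]
        simp [hca]

-- A's outer loop over the remaining indices, with the word restored to w on entry
theorem pv_outer (d : PySem.Dict String (List String)) (w : List Char) :
    ∀ (k a : Nat), a + k = w.length → ∀ (seen : List Char) (acc : List String),
    (PySem.List.pyRange (a : Int) (w.length : Int) 1).foldl (pvOuterA d) (w, seen, acc)
    = (w, seen ++ pvD (w.drop a) seen, acc ++ (pvD (w.drop a) seen).flatMap (pvChunk d w)) := by
  intro k
  induction k with
  | zero =>
    intro a ha seen acc
    have hnil : w.drop a = [] := List.drop_eq_nil_of_le (by omega)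
    rw [PySem.List.pyRange_one_eq_nil (by omega)]
    simp [hnil, pvD]
  | succ k ih =>
    intro a ha seen acc
    have hal : a < w.length := by omega
    rw [PySem.List.pyRange_one_cons (by exact_mod_cast hal)]
    have hcast : ((a : Int) + 1) = ((a + 1 : Nat) : Int) := by push_cast; ring
    have hdrop : w.drop a = w[a] :: w.drop (a + 1) := (List.getElem_cons_drop hal).symm
    simp only [List.foldl_cons]
    have hget : PySem.List.pyGetD w ((a : Nat) : Int) ' ' = w[a] := by
      rw [PySem.List.pyGetD_natCast, List.getD_eq_getElem _ _ hal]
    by_cases hseen : seen.contains w[a] = true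
    · -- skipped: letter already checked
      have hstep : pvOuterA d (w, seen, acc) ((a : Nat) : Int) = (w, seen, acc) := by
        unfold pvOuterA
        simp only [hget]
        rw [if_pos hseen]
      rw [hstep, hcast, ih (a + 1) (by omega) seen acc, hdrop]
      simp only [pvD]
      rw [if_pos hseen]
    · have hstep : pvOuterA d (w, seen, acc) ((a : Nat) : Int)
          = (w, seen ++ [w[a]], acc ++ pvChunk d w w[a]) := by
        unfold pvOuterA
        simp only [hget]
        rw [if_neg hseen]
        have hpair : (w, acc) = (w.set a w[a], acc) := by rw [List.set_getElem_self hal]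
        rw [hpair, pv_inner d w a w[a] pvAlphabet]
        dsimp only
        have hrestore : PySem.List.pySetD
            (w.set a (pvAlphabet.foldl (fun b j => if ¬ (w[a] == j) then j else b) w[a]))
            ((a : Nat) : Int) w[a] = w := by
          rw [PySem.List.pySetD_natCast, List.set_set, List.set_getElem_self hal]
        rw [hrestore]
        have hfun : ∀ j : Char,
            (if w[a] == j then []
             else (d.get? (String.ofList (PySem.List.sorted (w.set a j) (fun x => x) false))).getD ([] : List String))
            = (if w[a] == j then []
             else (d.get? (String.ofList (pvInsChar ((PySem.List.sorted w (fun x => x) false).erase w[a]) j))).getD []) := by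
          intro j
          by_cases hj : (w[a] == j) = true
          · simp [hj]
          · rw [if_neg hj, if_neg hj, pv_key_eq w a j hal]
        rw [funext hfun]
        rfl
      rw [hstep, hcast, ih (a + 1) (by omega) (seen ++ [w[a]]) (acc ++ pvChunk d w w[a]), hdrop]
      simp only [pvD]
      rw [if_neg hseen]
      simp [List.flatMap_cons, List.append_assoc]

-- B's double loop equals the same flatMap of pvChunk
theorem pv_b_loop (d : PySem.Dict String (List String)) (w : List Char) (dl : List Char)
    (hdl : ∀ c ∈ dl, c ∈ w) (out : List String) :
    dl.foldl (pvOuterB d (PySem.List.sorted w (fun x => x) false)) out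
    = out ++ dl.flatMap (pvChunk d w) := by
  induction dl generalizing out with
  | nil => simp
  | cons c dl ih =>
    have hcw : c ∈ w := hdl c List.mem_cons_self
    have hcs : c ∈ PySem.List.sorted w (fun x => x) false := by
      rw [PySem.List.mem_sorted]; exact hcw
    simp only [List.foldl_cons, List.flatMap_cons]
    have hstep : pvOuterB d (PySem.List.sorted w (fun x => x) false) out c
        = out ++ pvChunk d w c := by
      unfold pvOuterB
      rw [PySem.List.remove?_eq_some_erase _ c hcs]
      unfold pvChunk
      rw [← PySem.List.foldl_append_eq_flatMap]
      apply PySem.List.foldl_congr_mem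
      intro acc j _
      have hins : pvInsort ((PySem.List.sorted w (fun x => x) false).erase c) j
          = pvInsChar ((PySem.List.sorted w (fun x => x) false).erase c) j :=
        pvInsort_eq_pvInsChar _ _
          (List.Pairwise.sublist List.erase_sublist (PySem.List.sorted_pairwise _ _))
      by_cases hjc : j = c
      · simp [pvInnerB, hjc]
      · have hne : ¬ ((c == j) = true) := by simp [Ne.symm hjc]
        cases hget : d.get? (String.ofList (pvInsChar ((PySem.List.sorted w (fun x => x) false).erase c) j)) with
        | some items =>
          have hc : d.contains (String.ofList (pvInsChar ((PySem.List.sorted w (fun x => x) false).erase c) j)) = true := by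
            rw [PySem.Dict.contains_eq_isSome_get?, hget]; rfl
          simp [pvInnerB, hins, hjc, hne, hc, PySem.Dict.getD_of_get?_eq_some d [] hget]
        | none =>
          have hc : d.contains (String.ofList (pvInsChar ((PySem.List.sorted w (fun x => x) false).erase c) j)) = false := by
            rw [PySem.Dict.contains_eq_isSome_get?, hget]; rfl
          simp [pvInnerB, hins, hjc, hne, hc]
    rw [hstep, ih (fun c hc => hdl c (List.mem_cons_of_mem _ hc))]
    simp [List.append_assoc]

-- ===== VERDICT (by name: the statement is the Claim_ definition above) =====
theorem blanagram_spec : Claim_equal_blanagram := by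
  intro word anagramdict _
  unfold Spec_blanagram blanagram blanagram_alt
  dsimp only
  set d := PySem.Dict.mk anagramdict with hd
  set w1 := (if (PySem.Chars.lower word.toList).contains '-' then
      match PySem.List.remove? (PySem.Chars.lower word.toList) '-' with
      | some r => r
      | none => PySem.Chars.lower word.toList
    else PySem.Chars.lower word.toList) with hw1
  have h0 := pv_outer d w1 w1.length 0 (by omega) [] []
  simp only [Nat.cast_zero, List.drop_zero, List.nil_append] at h0
  rw [h0, pvD_fold w1 []]
  simp only [List.nil_append]
  rw [pv_b_loop d w1 (pvD w1 []) (fun c hc => pvD_mem hc) []]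
  simp
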